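-- pv_equiv track=rewrite | github.com/walkccc/LeetCode | solutions/3557. Find Maximum Number of Non Intersecting Substrings/3557.py | maxSubstrings
-- ===== SOURCE A (Python) =====
-- def maxSubstrings(word: str) -> int:
--   ans = 0
--   firstSeen = {}
--
--   for i, c in enumerate(word):
--     if c not in firstSeen:
--       firstSeen[c] = i
--     elif i - firstSeen[c] + 1 >= 4:
--       ans += 1
--       firstSeen.clear()
--
--   return ans
-- ===== SOURCE B (Python) =====
-- def maxSubstrings(word: str) -> int:
--     n = len(word)
--     ans = 0
--     s = 0
--     while s + 3 < n:
--         # chars of word[s:j-2], i.e. those far enough back to make a span >= 4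
--         present = set()
--         j = s + 3
--         found = False
--         while j < n:
--             present.add(word[j - 3])
--             if word[j] in present:
--                 found = True
--                 break
--             j += 1
--         if not found:
--             break
--         ans += 1
--         s = j + 1
--     return ans
-- ===== Notes on version B (the rewrite author's own statement) =====
-- stated objective: alternative
-- what changed: B drops A's first-occurrence-index dictionary and its span arithmetic entirely: per segment it maintains a plain set of characters lying at least 3 positions back (inserting word[j-3] before testing word[j]), so a match is pure set membership with no stored positions, run as explicit per-segment scans.
import Mathlib
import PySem

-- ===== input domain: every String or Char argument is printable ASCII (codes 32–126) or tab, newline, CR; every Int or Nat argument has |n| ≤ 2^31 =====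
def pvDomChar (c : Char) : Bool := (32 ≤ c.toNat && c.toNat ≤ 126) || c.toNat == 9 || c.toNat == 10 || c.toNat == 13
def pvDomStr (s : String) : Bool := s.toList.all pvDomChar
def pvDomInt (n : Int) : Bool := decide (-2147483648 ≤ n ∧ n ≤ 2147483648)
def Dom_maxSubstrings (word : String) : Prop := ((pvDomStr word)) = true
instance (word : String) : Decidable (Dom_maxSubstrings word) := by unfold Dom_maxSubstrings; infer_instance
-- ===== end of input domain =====

-- B replaces A's first-occurrence-index dictionary and span arithmetic with a per-segment set of
-- characters at distance ≥ 3 behind the scan point, tested by pure membership (alternative, same cost).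

-- ===== PORT A =====
-- the body of A's for loop, named so the fold can be reasoned about
def aStep (st : Int × PySem.Dict Char Int) (ic : Int × Char) : Int × PySem.Dict Char Int :=
  if st.2.contains ic.2 = false then (st.1, st.2.insert ic.2 ic.1)
  else if ic.1 - st.2.getD ic.2 0 + 1 ≥ 4 then (st.1 + 1, PySem.Dict.empty)
  else st

def maxSubstrings (word : String) : Int :=
  ((PySem.List.enumerate word.toList 0).foldl aStep (0, PySem.Dict.empty)).1

-- ===== PORT B =====
-- inner while loop: window a b c = word[j-3..j-1], l = word[j:]; adds a to `present`, tests the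
-- current char; `some tail` = break with word[j+1:] = tail, `none` = scan exhausted (not found)
def bInner (present : PySem.Set Char) (a b c : Char) (l : List Char) : Option (List Char) :=
  match l with
  | [] => none
  | d :: tail =>
    let p' := PySem.Set.add present a
    if p'.contains d then some tail else bInner p' b c d tail

-- needed by bOuter's termination: a break consumes at least one character
theorem bInner_length {present : PySem.Set Char} {a b c : Char} {l tail : List Char}
    (h : bInner present a b c l = some tail) : tail.length < l.length := by
  induction l generalizing present a b c with
  | nil => simp [bInner] at h
  | cons d t ih =>
    simp only [bInner] at h
    split at h
    · cases h; simp
    · exact Nat.lt_succ_of_lt (ih h)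

-- outer while loop: one fresh set per segment; a segment needs at least 4 characters (s + 3 < n)
def bOuter (ans : Int) (l : List Char) : Int :=
  match l with
  | a :: b :: c :: d :: rest =>
    match h : bInner PySem.Set.empty a b c (d :: rest) with
    | none => ans
    | some tail => bOuter (ans + 1) tail
  | _ => ans
termination_by l.length
decreasing_by
  have := bInner_length h
  simp at this ⊢
  omega

def maxSubstrings_alt (word : String) : Int := bOuter 0 word.toList

-- ===== PRECONDITION & SPEC =====
def Spec_maxSubstrings (word : String) (out : Int) : Prop := out = maxSubstrings_alt word
instance (word : String) (out : Int) : Decidable (Spec_maxSubstrings word out) := by unfold Spec_maxSubstrings; infer_instance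

-- ===== CLAIM (what is proved, stated in full; the proofs are below) =====
def Claim_equal_maxSubstrings : Prop := ∀ (word : String), Dom_maxSubstrings word → Spec_maxSubstrings word (maxSubstrings word)

-- ===== LEMMAS AND PROOFS =====

-- index of the first occurrence (length of the list if absent)
def fidx (d : Char) : List Char → Nat
  | [] => 0
  | x :: t => if x = d then 0 else fidx d t + 1

theorem mem_take_iff_fidx (d : Char) (p : List Char) : ∀ (m : Nat), d ∈ p.take m ↔ d ∈ p ∧ fidx d p < m := by
  induction p with
  | nil => intro m; simp
  | cons x t ih =>
    intro m
    cases m with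
    | zero => simp
    | succ m =>
      by_cases hx : x = d
      · subst hx; simp [fidx]
      · simp [fidx, hx, Ne.symm hx, ih m]

theorem fidx_append_of_mem {d : Char} {p : List Char} (h : d ∈ p) (l : List Char) :
    fidx d (p ++ l) = fidx d p := by
  induction p with
  | nil => simp at h
  | cons x t ih =>
    by_cases hx : x = d
    · simp [fidx, hx]
    · simp [fidx, hx, ih (by simpa [Ne.symm hx] using h)]

theorem fidx_append_self {d : Char} {p : List Char} (h : d ∉ p) :
    fidx d (p ++ [d]) = p.length := by
  induction p with
  | nil => simp [fidx]
  | cons x t ih =>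
    simp only [List.mem_cons, not_or] at h
    have hx : ¬ x = d := fun he => h.1 he.symm
    simp [fidx, hx, ih h.2]

-- invariant: `seen` is exactly A's first-occurrence dict of the processed segment prefix p (base index i0)
def SeenInv (seen : PySem.Dict Char Int) (p : List Char) (i0 : Int) : Prop :=
  ∀ ch, seen.get? ch = if ch ∈ p then some (i0 + (fidx ch p : Int)) else none

theorem SeenInv_empty (i0 : Int) : SeenInv PySem.Dict.empty [] i0 := by
  intro ch; simp [PySem.Dict.get?_empty]

-- A fires at the next char d exactly when d occurs among the first (p.length - 2) processed chars
theorem aStep_fire {seen : PySem.Dict Char Int} {p : List Char} {i0 : Int} (ans : Int) {d : Char}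
    (hSeenInv : SeenInv seen p i0) (hd : d ∈ p.take (p.length - 2)) :
    aStep (ans, seen) (i0 + (p.length : Int), d) = (ans + 1, PySem.Dict.empty) := by
  rw [mem_take_iff_fidx] at hd
  have hget := hSeenInv d
  rw [if_pos hd.1] at hget
  have hcon : seen.contains d = true := by rw [PySem.Dict.contains_eq_isSome_get?, hget]; rfl
  have hgd : seen.getD d 0 = i0 + (fidx d p : Int) := by
    simp [PySem.Dict.getD_eq_get?_getD, hget]
  have hcond : i0 + (p.length : Int) - seen.getD d 0 + 1 ≥ 4 := by
    rw [hgd]; have := hd.2; omega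
  simp [aStep, hcon, hcond]

theorem aStep_no_fire {seen : PySem.Dict Char Int} {p : List Char} {i0 : Int} (ans : Int) {d : Char}
    (hSeenInv : SeenInv seen p i0) (hd : d ∉ p.take (p.length - 2)) :
    ∃ seen', aStep (ans, seen) (i0 + (p.length : Int), d) = (ans, seen') ∧ SeenInv seen' (p ++ [d]) i0 := by
  by_cases hm : d ∈ p
  · -- d already seen: A's elif condition fails, dict unchanged
    have hget := hSeenInv d
    rw [if_pos hm] at hget
    have hcon : seen.contains d = true := by rw [PySem.Dict.contains_eq_isSome_get?, hget]; rfl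
    have hgd : seen.getD d 0 = i0 + (fidx d p : Int) := by
      simp [PySem.Dict.getD_eq_get?_getD, hget]
    have hfid : ¬ (fidx d p < p.length - 2) := fun h => hd ((mem_take_iff_fidx d p _).2 ⟨hm, h⟩)
    have hfle : fidx d p < p.length := by
      rcases (mem_take_iff_fidx d p p.length).1 (by simpa using hm) with ⟨-, h⟩; exact h
    have hcond : ¬ (i0 + (p.length : Int) - seen.getD d 0 + 1 ≥ 4) := by
      rw [hgd]; omega
    refine ⟨seen, by simp [aStep, hcon, hcond], ?_⟩
    intro ch
    by_cases hchp : ch ∈ p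
    · rw [hSeenInv ch, if_pos hchp, if_pos (by simp [hchp]), fidx_append_of_mem hchp]
    · have hne : ch ≠ d := fun h => hchp (h ▸ hm)
      rw [hSeenInv ch, if_neg hchp, if_neg (by simp [hchp, hne])]
  · -- d unseen: A inserts it at the current index
    have hget := hSeenInv d
    rw [if_neg hm] at hget
    have hcon : seen.contains d = false := by rw [PySem.Dict.contains_eq_isSome_get?, hget]; rfl
    refine ⟨seen.insert d (i0 + (p.length : Int)), by simp [aStep, hcon], ?_⟩
    intro ch
    by_cases hch : ch = d
    · subst hch
      rw [PySem.Dict.get?_insert_self, if_pos (by simp), fidx_append_self hm]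
    · rw [PySem.Dict.get?_insert, if_neg hch, hSeenInv ch]
      by_cases hchp : ch ∈ p
      · rw [if_pos hchp, if_pos (by simp [hchp]), fidx_append_of_mem hchp]
      · rw [if_neg hchp, if_neg (by simp [hchp, hch])]

-- the prefix of processed chars far enough back for a span ≥ 4, at the moment window a b c is in hand
theorem take_window (q : List Char) (a b c : Char) :
    (q ++ [a, b, c]).take ((q ++ [a, b, c]).length - 2) = q ++ [a] := by
  simp [List.take_append]

-- inner correspondence: A's fold over the remaining segment vs B's inner scan
theorem inner_fold (rest : List Char) :
    ∀ (q : List Char) (a b c : Char) (seen : PySem.Dict Char Int) (present : PySem.Set Char)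
      (ans i0 : Int), SeenInv seen (q ++ [a, b, c]) i0 → (∀ ch, ch ∈ present ↔ ch ∈ q) →
    (match bInner present a b c rest with
     | none =>
         ((PySem.List.enumerate rest (i0 + ((q ++ [a, b, c]).length : Int))).foldl aStep (ans, seen)).1 = ans
     | some tail => ∃ j',
         ((PySem.List.enumerate rest (i0 + ((q ++ [a, b, c]).length : Int))).foldl aStep (ans, seen)).1
           = ((PySem.List.enumerate tail j').foldl aStep (ans + 1, PySem.Dict.empty)).1) := by
  induction rest with
  | nil =>
    intro q a b c seen present ans i0 hSeenInv hpre
    simp [bInner, PySem.List.enumerate_nil]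
  | cons d tail ih =>
    intro q a b c seen present ans i0 hSeenInv hpre
    rw [PySem.List.enumerate_cons, List.foldl_cons]
    simp only [bInner]
    have hmem : (PySem.Set.add present a).contains d = true ↔ d ∈ q ++ [a] := by
      rw [PySem.Set.contains_iff, PySem.Set.mem_add]; simp [hpre d]
    by_cases hc : (PySem.Set.add present a).contains d = true
    · -- break: A fires at this index
      rw [if_pos hc]
      have hfire := aStep_fire (seen := seen) (p := q ++ [a, b, c]) ans hSeenInv
        (by rw [take_window]; exact hmem.1 hc)
      rw [hfire]
      exact ⟨i0 + ((q ++ [a, b, c]).length : Int) + 1, rfl⟩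
    · -- continue: A does not fire; recurse with window b c d
      rw [if_neg hc]
      obtain ⟨seen', hstep, hSeenInv'⟩ := aStep_no_fire (seen := seen) (p := q ++ [a, b, c]) ans hSeenInv
        (by rw [take_window]; exact fun hmm => hc (hmem.2 hmm))
      rw [hstep]
      have hSeenInv'' : SeenInv seen' ((q ++ [a]) ++ [b, c, d]) i0 := by
        have : (q ++ [a, b, c]) ++ [d] = (q ++ [a]) ++ [b, c, d] := by simp
        rwa [this] at hSeenInv'
      have hpre' : ∀ ch, ch ∈ PySem.Set.add present a ↔ ch ∈ q ++ [a] := by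
        intro ch; rw [PySem.Set.mem_add]; simp [hpre ch]
      have hidx : i0 + ((q ++ [a, b, c]).length : Int) + 1
          = i0 + (((q ++ [a]) ++ [b, c, d]).length : Int) := by
        simp; omega
      rw [hidx]
      exact ih (q ++ [a]) b c d seen' (PySem.Set.add present a) ans i0 hSeenInv'' hpre'

-- a short remainder (fewer than 4 chars processed+left in the segment) never fires
theorem fold_short (l : List Char) :
    ∀ (p : List Char) (seen : PySem.Dict Char Int) (ans i0 : Int), SeenInv seen p i0 →
      p.length + l.length ≤ 3 →
      ((PySem.List.enumerate l (i0 + (p.length : Int))).foldl aStep (ans, seen)).1 = ans := by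
  induction l with
  | nil => intro p seen ans i0 _ _; simp [PySem.List.enumerate_nil]
  | cons d tail ih =>
    intro p seen ans i0 hSeenInv hlen
    rw [PySem.List.enumerate_cons, List.foldl_cons]
    obtain ⟨seen', hstep, hSeenInv'⟩ := aStep_no_fire (p := p) ans hSeenInv
      (by have : p.length - 2 = 0 := by simp at hlen; omega
          simp [this])
    rw [hstep]
    have hidx : i0 + (p.length : Int) + 1 = i0 + ((p ++ [d]).length : Int) := by simp; omega
    rw [hidx]
    exact ih (p ++ [d]) seen' ans i0 hSeenInv' (by simp at hlen ⊢; omega)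

-- the first three chars of a segment never fire; A's dict after them satisfies the invariant
theorem fold_first3 (a b c : Char) (rest : List Char) (ans i0 : Int) :
    ∃ seen3, ((PySem.List.enumerate (a :: b :: c :: rest) i0).foldl aStep (ans, PySem.Dict.empty)).1
        = ((PySem.List.enumerate rest (i0 + 3)).foldl aStep (ans, seen3)).1
      ∧ SeenInv seen3 [a, b, c] i0 := by
  obtain ⟨s1, h1, hI1⟩ := aStep_no_fire (p := ([] : List Char)) (i0 := i0) ans (SeenInv_empty i0) (by simp)
  obtain ⟨s2, h2, hI2⟩ := aStep_no_fire (p := [a]) (i0 := i0) ans hI1 (by simp)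
  obtain ⟨s3, h3, hI3⟩ := aStep_no_fire (p := [a, b]) (i0 := i0) ans hI2 (by simp)
  refine ⟨s3, ?_, by simpa using hI3⟩
  rw [PySem.List.enumerate_cons, PySem.List.enumerate_cons, PySem.List.enumerate_cons]
  simp only [List.foldl_cons]
  have h1' : aStep (ans, PySem.Dict.empty) (i0, a) = (ans, s1) := by
    have e : i0 + ((([] : List Char)).length : Int) = i0 := by simp
    rwa [e] at h1
  have h2' : aStep (ans, s1) (i0 + 1, b) = (ans, s2) := by
    have e : i0 + ((([a] : List Char)).length : Int) = i0 + 1 := by simp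
    rwa [e] at h2
  have h3' : aStep (ans, s2) (i0 + 1 + 1, c) = (ans, s3) := by
    have e : i0 + ((([a, b] : List Char)).length : Int) = i0 + 1 + 1 := by simp; ring
    rwa [e] at h3
  rw [h1', h2', h3', show i0 + 1 + 1 + 1 = i0 + 3 from by ring]

-- A's fold, started at any segment boundary with a cleared dict, computes B's outer loop
theorem fold_eq_bOuter (ans : Int) (l : List Char) :
    ∀ i0 : Int, ((PySem.List.enumerate l i0).foldl aStep (ans, PySem.Dict.empty)).1 = bOuter ans l := by
  fun_induction bOuter ans l with
  | case1 ans a b c d rest h =>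
    intro i0
    obtain ⟨seen3, heq, hI3⟩ := fold_first3 a b c (d :: rest) ans i0
    rw [heq]
    have := inner_fold (d :: rest) [] a b c seen3 PySem.Set.empty ans i0 (by simpa using hI3)
      (by intro ch; simp [PySem.Set.empty])
    rw [h] at this
    simpa using this
  | case2 ans a b c d rest tail h ih =>
    intro i0
    obtain ⟨seen3, heq, hI3⟩ := fold_first3 a b c (d :: rest) ans i0
    rw [heq]
    have := inner_fold (d :: rest) [] a b c seen3 PySem.Set.empty ans i0 (by simpa using hI3)
      (by intro ch; simp [PySem.Set.empty])
    rw [h] at this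
    obtain ⟨j', hj⟩ := this
    rw [show i0 + (([] ++ [a, b, c] : List Char).length : Int) = i0 + 3 by simp] at hj
    rw [hj]
    exact ih j'
  | case3 ans l h1 =>
    intro i0
    have hlen : l.length ≤ 3 := by
      match l, h1 with
      | [], _ => simp
      | [a], _ => simp
      | [a, b], _ => simp
      | [a, b, c], _ => simp
      | a :: b :: c :: d :: rest, h1 => exact (h1 a b c d rest rfl).elim
    have := fold_short l [] PySem.Dict.empty ans i0 (SeenInv_empty i0) (by simpa using hlen)
    simpa using this

-- ===== VERDICT (by name: the statement is the Claim_ definition above) =====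
theorem maxSubstrings_spec : Claim_equal_maxSubstrings := by
  intro word _
  show maxSubstrings word = maxSubstrings_alt word
  unfold maxSubstrings maxSubstrings_alt
  exact fold_eq_bOuter 0 word.toList 0
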